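-- pv_equiv track=rewrite | github.com/guiduck/job-hunt | apps/api/app/services/job_review_scoring.py | calculate_historical_similarity_signals
-- ===== SOURCE A (Python) =====
-- def calculate_historical_similarity_signals(outcomes: list[str]) -> dict[str, object]:
--     positive = sum(1 for outcome in outcomes if outcome in {"saved", "responded", "interview"})
--     negative = sum(1 for outcome in outcomes if outcome in {"rejected", "ignored"})
--     comparable_count = positive + negative
--     adjustment = max(-20, min(20, positive * 5 - negative * 5))
--     return {
--         "comparable_count": comparable_count,
--         "positive_outcome_count": positive,
--         "negative_outcome_count": negative,
--         "adjustment": adjustment,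
--     }
-- ===== SOURCE B (Python) =====
-- _WEIGHT = {"saved": 1, "responded": 1, "interview": 1, "rejected": -1, "ignored": -1}
--
-- def calculate_historical_similarity_signals(outcomes: list[str]) -> dict[str, object]:
--     ordered = sorted(outcomes)
--     positive = 0
--     negative = 0
--     i = 0
--     n = len(ordered)
--     while i < n:
--         j = i + 1
--         while j < n and ordered[j] == ordered[i]:
--             j += 1
--         w = _WEIGHT.get(ordered[i], 0)
--         if w > 0:
--             positive += j - i
--         elif w < 0:
--             negative += j - i
--         i = j
--     score = 5 * (positive - negative)
--     if score > 20:
--         score = 20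
--     elif score < -20:
--         score = -20
--     return {
--         "comparable_count": positive + negative,
--         "positive_outcome_count": positive,
--         "negative_outcome_count": negative,
--         "adjustment": score,
--     }
-- ===== Notes on version B (the rewrite author's own statement) =====
-- stated objective: alternative
-- what changed: Replaces the two linear set-membership filtering scans with a sort-then-run-scan: sort the outcomes, walk maximal runs of equal labels with a two-index loop, classify each run once through a signed weight table and add its length to the positive or negative tally, then clamp the score with an if-chain instead of max/min.
import Mathlib
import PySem

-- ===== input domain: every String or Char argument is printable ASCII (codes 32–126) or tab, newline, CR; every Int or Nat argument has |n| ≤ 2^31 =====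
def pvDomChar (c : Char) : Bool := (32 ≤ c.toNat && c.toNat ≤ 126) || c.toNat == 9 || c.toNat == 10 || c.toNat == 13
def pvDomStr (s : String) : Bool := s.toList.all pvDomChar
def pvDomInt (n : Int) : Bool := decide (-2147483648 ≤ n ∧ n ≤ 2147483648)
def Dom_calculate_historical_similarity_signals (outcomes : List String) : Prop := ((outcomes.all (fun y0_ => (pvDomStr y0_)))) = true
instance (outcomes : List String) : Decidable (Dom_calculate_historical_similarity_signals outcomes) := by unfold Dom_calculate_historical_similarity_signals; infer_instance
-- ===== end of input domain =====

-- B replaces two filtering scans by sort-then-run-scan over a signed weight table (alternative algorithm, same result).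

-- ===== PORT A =====
def calculate_historical_similarity_signals (outcomes : List String) : List (String × Int) :=
  let positive : Int := outcomes.foldl (fun acc outcome =>
    if outcome == "saved" || outcome == "responded" || outcome == "interview" then acc + 1 else acc) 0
  let negative : Int := outcomes.foldl (fun acc outcome =>
    if outcome == "rejected" || outcome == "ignored" then acc + 1 else acc) 0
  let comparable_count := positive + negative
  let adjustment := max (-20) (min 20 (positive * 5 - negative * 5))
  [("comparable_count", comparable_count),
   ("positive_outcome_count", positive),
   ("negative_outcome_count", negative),
   ("adjustment", adjustment)]

-- ===== PORT B =====
-- _WEIGHT = {"saved": 1, "responded": 1, "interview": 1, "rejected": -1, "ignored": -1}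
def pvWeight : PySem.Dict String Int :=
  PySem.Dict.ofList [("saved", 1), ("responded", 1), ("interview", 1), ("rejected", -1), ("ignored", -1)]

-- the outer while loop of Source B: consume one maximal run of equal labels per step
-- (the inner `while j < n and ordered[j] == ordered[i]` is the takeWhile/dropWhile split of the tail).
def pvTallyRuns : List String → Int × Int
  | [] => (0, 0)
  | x :: rest =>
    let run := rest.takeWhile (fun z => z == x)
    let pq := pvTallyRuns (rest.dropWhile (fun z => z == x))
    let len : Int := 1 + run.length
    let w := pvWeight.getD x 0
    if 0 < w then (pq.1 + len, pq.2)
    else if w < 0 then (pq.1, pq.2 + len)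
    else pq
termination_by l => l.length
decreasing_by
  simp only [List.length_cons]
  exact Nat.lt_succ_of_le (List.length_dropWhile_le _ _)

def calculate_historical_similarity_signals_alt (outcomes : List String) : List (String × Int) :=
  let ordered := PySem.List.sorted outcomes (fun x => x) false
  let pq := pvTallyRuns ordered
  let positive := pq.1
  let negative := pq.2
  let score0 := 5 * (positive - negative)
  let score := if score0 > 20 then 20 else if score0 < -20 then (-20 : Int) else score0
  [("comparable_count", positive + negative),
   ("positive_outcome_count", positive),
   ("negative_outcome_count", negative),
   ("adjustment", score)]

-- ===== PRECONDITION & SPEC =====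
def Spec_calculate_historical_similarity_signals (outcomes : List String) (out : List (String × Int)) : Prop := out = calculate_historical_similarity_signals_alt outcomes
instance (outcomes : List String) (out : List (String × Int)) : Decidable (Spec_calculate_historical_similarity_signals outcomes out) := by unfold Spec_calculate_historical_similarity_signals; infer_instance

-- ===== CLAIM (what is proved, stated in full; the proofs are below) =====
def Claim_equal_calculate_historical_similarity_signals : Prop := ∀ (outcomes : List String), Dom_calculate_historical_similarity_signals outcomes → Spec_calculate_historical_similarity_signals outcomes (calculate_historical_similarity_signals outcomes)

-- ===== LEMMAS AND PROOFS =====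

def pvPosB (x : String) : Bool := x == "saved" || x == "responded" || x == "interview"
def pvNegB (x : String) : Bool := x == "rejected" || x == "ignored"

theorem pvWeight_items : pvWeight = PySem.Dict.mk [("saved", 1), ("responded", 1), ("interview", 1), ("rejected", -1), ("ignored", -1)] := by
  rfl

theorem pvWeight_pos (x : String) : decide (0 < pvWeight.getD x 0) = pvPosB x := by
  rw [pvWeight_items]
  by_cases h1 : x = "saved"; · subst h1; decide
  by_cases h2 : x = "responded"; · subst h2; decide
  by_cases h3 : x = "interview"; · subst h3; decide
  by_cases h4 : x = "rejected"; · subst h4; decide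
  by_cases h5 : x = "ignored"; · subst h5; decide
  have e1 : ("saved" == x) = false := beq_eq_false_iff_ne.mpr (fun h => h1 h.symm)
  have e2 : ("responded" == x) = false := beq_eq_false_iff_ne.mpr (fun h => h2 h.symm)
  have e3 : ("interview" == x) = false := beq_eq_false_iff_ne.mpr (fun h => h3 h.symm)
  have e4 : ("rejected" == x) = false := beq_eq_false_iff_ne.mpr (fun h => h4 h.symm)
  have e5 : ("ignored" == x) = false := beq_eq_false_iff_ne.mpr (fun h => h5 h.symm)
  have f1 : (x == "saved") = false := beq_eq_false_iff_ne.mpr h1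
  have f2 : (x == "responded") = false := beq_eq_false_iff_ne.mpr h2
  have f3 : (x == "interview") = false := beq_eq_false_iff_ne.mpr h3
  simp [pvPosB, PySem.Dict.getD, PySem.Dict.get?, e1, e2, e3, e4, e5, f1, f2, f3]

theorem pvWeight_neg (x : String) : decide (pvWeight.getD x 0 < 0) = pvNegB x := by
  rw [pvWeight_items]
  by_cases h1 : x = "saved"; · subst h1; decide
  by_cases h2 : x = "responded"; · subst h2; decide
  by_cases h3 : x = "interview"; · subst h3; decide
  by_cases h4 : x = "rejected"; · subst h4; decide
  by_cases h5 : x = "ignored"; · subst h5; decide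
  have e1 : ("saved" == x) = false := beq_eq_false_iff_ne.mpr (fun h => h1 h.symm)
  have e2 : ("responded" == x) = false := beq_eq_false_iff_ne.mpr (fun h => h2 h.symm)
  have e3 : ("interview" == x) = false := beq_eq_false_iff_ne.mpr (fun h => h3 h.symm)
  have e4 : ("rejected" == x) = false := beq_eq_false_iff_ne.mpr (fun h => h4 h.symm)
  have e5 : ("ignored" == x) = false := beq_eq_false_iff_ne.mpr (fun h => h5 h.symm)
  have f4 : (x == "rejected") = false := beq_eq_false_iff_ne.mpr h4
  have f5 : (x == "ignored") = false := beq_eq_false_iff_ne.mpr h5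
  simp [pvNegB, PySem.Dict.getD, PySem.Dict.get?, e1, e2, e3, e4, e5, f4, f5]

theorem countP_all_eq (p : String → Bool) (x : String) (t : List String)
    (h : ∀ y ∈ t, y = x) : t.countP p = if p x then t.length else 0 := by
  induction t with
  | nil => simp
  | cons a t ih =>
    have ha : a = x := h a (by simp)
    rw [List.countP_cons, ih (fun y hy => h y (by simp [hy])), ha]
    rcases hp : p x <;> simp

theorem countP_cons_runs (p : String → Bool) (x : String) (rest : List String) :
    (((x :: rest).countP p : Nat) : Int)
      = ((rest.dropWhile (fun z => z == x)).countP p : Int)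
        + (if p x then 1 + ((rest.takeWhile (fun z => z == x)).length : Int) else 0) := by
  have hall : ∀ y ∈ rest.takeWhile (fun z => z == x), y = x := fun y hy =>
    beq_iff_eq.mp (List.mem_takeWhile_imp (p := fun z => z == x) (l := rest) hy)
  conv_lhs => rw [← List.takeWhile_append_dropWhile (p := fun z => z == x) (l := rest)]
  rw [List.countP_cons, List.countP_append, countP_all_eq p x _ hall]
  rcases hp : p x <;> simp <;> push_cast <;> ring

-- the run-scan counts exactly the elements whose weight is positive / negative
theorem pvTallyRuns_eq (l : List String) :
    pvTallyRuns l = ((l.countP pvPosB : Int), (l.countP pvNegB : Int)) := by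
  induction hlen : l.length using Nat.strong_induction_on generalizing l with
  | _ n ih =>
  match l, hlen with
  | [], _ => simp [pvTallyRuns]
  | x :: rest, hlen =>
    have hdrop : (rest.dropWhile (fun z => z == x)).length < n := by
      subst hlen
      simp only [List.length_cons]
      exact Nat.lt_succ_of_le (List.length_dropWhile_le _ _)
    have ihd := ih _ hdrop (rest.dropWhile (fun z => z == x)) rfl
    rw [pvTallyRuns]
    by_cases hw : 0 < pvWeight.getD x 0
    · have hp : pvPosB x = true := by rw [← pvWeight_pos]; exact decide_eq_true hw
      have hn : pvNegB x = false := by rw [← pvWeight_neg]; exact decide_eq_false (by omega)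
      simp only [if_pos hw, ihd, countP_cons_runs, hp, hn, if_true, if_false]
      refine Prod.ext ?_ ?_ <;> simp <;> ring
    · by_cases h2 : pvWeight.getD x 0 < 0
      · have hp : pvPosB x = false := by rw [← pvWeight_pos]; exact decide_eq_false hw
        have hn : pvNegB x = true := by rw [← pvWeight_neg]; exact decide_eq_true h2
        simp only [if_neg hw, if_pos h2, ihd, countP_cons_runs, hp, hn, if_true, if_false]
        refine Prod.ext ?_ ?_ <;> simp <;> ring
      · have hp : pvPosB x = false := by rw [← pvWeight_pos]; exact decide_eq_false hw
        have hn : pvNegB x = false := by rw [← pvWeight_neg]; exact decide_eq_false h2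
        simp only [if_neg hw, if_neg h2, ihd, countP_cons_runs, hp, hn, if_true, if_false]
        refine Prod.ext ?_ ?_ <;> simp

theorem pvFoldl_countP (p : String → Bool) (l : List String) (init : Int) :
    l.foldl (fun acc o => if p o then acc + 1 else acc) init = init + l.countP p := by
  induction l generalizing init with
  | nil => simp
  | cons h t ih =>
    simp only [List.foldl_cons, ih, List.countP_cons]
    rcases hp : p h <;> simp [hp] <;> push_cast <;> ring

theorem pvClamp (s : Int) :
    max (-20) (min 20 s) = if s > 20 then 20 else if s < -20 then (-20 : Int) else s := by
  simp only [max_def, min_def]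
  split_ifs <;> omega

-- ===== VERDICT (by name: the statement is the Claim_ definition above) =====
theorem calculate_historical_similarity_signals_spec : Claim_equal_calculate_historical_similarity_signals := by
  intro outcomes _
  unfold Spec_calculate_historical_similarity_signals
  unfold calculate_historical_similarity_signals calculate_historical_similarity_signals_alt
  have hperm := PySem.List.sorted_perm outcomes (fun x => x) false
  simp only [pvTallyRuns_eq, hperm.countP_eq, pvPosB, pvNegB]
  rw [pvFoldl_countP (fun o => o == "saved" || o == "responded" || o == "interview"),
      pvFoldl_countP (fun o => o == "rejected" || o == "ignored"), pvClamp]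
  have h5 : ∀ a b : Int, a * 5 - b * 5 = 5 * (a - b) := by intro a b; ring
  simp only [zero_add, h5]
  unfold pvPosB pvNegB
  rfl
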